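-- pv_equiv track=rewrite | github.com/yeseong31/coding-test | Programmers/PCCP/외톨이_알파벳.py | solution
-- ===== SOURCE A (Python) =====
-- import collections
--
-- def solution(input_string):
--     dic = collections.defaultdict(int)
--     left = right = 0
--     while left <= right < len(input_string):
--         # 단어 뭉치 확인
--         while right < len(input_string) and input_string[left] == input_string[right]:
--             right += 1
--         # 탐색 알파벳 저장
--         dic[input_string[left]] += 1
--         # 탐색 위치 초기화
--         left = right
--     # 외톨이 알파벳 확인
--     answer = set()
--     for d in dic.keys():
--         if dic[d] >= 2:
--             answer.add(d)
--     # 결과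
--     if not answer:
--         return 'N'
--     return ''.join(sorted(answer))
-- ===== SOURCE B (Python) =====
-- def solution(input_string):
--     # a char is a "lonely alphabet" iff its occurrences are not one contiguous
--     # block: the span from first to last occurrence exceeds its count
--     lonely = [c for c in sorted(set(input_string))
--               if input_string.rindex(c) - input_string.index(c) + 1 != input_string.count(c)]
--     return ''.join(lonely) if lonely else 'N'
-- ===== Notes on version B (the rewrite author's own statement) =====
-- stated objective: alternative
-- what changed: Drops run detection entirely: instead of scanning runs and counting them per distinct character, B tests each distinct character for contiguity by index arithmetic (rindex - index + 1 != count), which holds exactly when the character occurs in at least two separate runs.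
import Mathlib
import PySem

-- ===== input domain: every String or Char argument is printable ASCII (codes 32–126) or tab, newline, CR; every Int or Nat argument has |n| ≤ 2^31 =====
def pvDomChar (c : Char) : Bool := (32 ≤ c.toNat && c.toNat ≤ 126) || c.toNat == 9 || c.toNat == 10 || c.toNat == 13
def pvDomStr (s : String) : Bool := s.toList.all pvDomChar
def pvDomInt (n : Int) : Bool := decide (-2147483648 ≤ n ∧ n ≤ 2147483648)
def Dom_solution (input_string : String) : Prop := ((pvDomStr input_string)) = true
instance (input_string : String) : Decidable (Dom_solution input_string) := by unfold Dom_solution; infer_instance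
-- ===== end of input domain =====

-- B drops run detection: it tests each distinct character for contiguity by index
-- arithmetic (rindex - index + 1 != count), a different algorithm of similar cost.


-- ===== PORT A =====
-- inner 'while right < len and input_string[left] == input_string[right]: right += 1'
def pvSkipA (s : List Char) (c : Char) (right : Nat) : Nat :=
  if h : right < s.length then
    if s[right] = c then pvSkipA s c (right + 1) else right
  else right
termination_by s.length - right

theorem pvSkipA_ge (s : List Char) (c : Char) (right : Nat) : right ≤ pvSkipA s c right := by
  unfold pvSkipA
  split
  · split
    · exact le_trans (Nat.le_succ _) (pvSkipA_ge s c (right + 1))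
    · exact le_refl _
  · exact le_refl _
termination_by s.length - right

-- outer 'while left <= right < len(input_string)' (left = right at each entry)
def pvLoopA (s : List Char) (left : Nat) (dic : PySem.Dict Char Int) : PySem.Dict Char Int :=
  if h : left < s.length then
    pvLoopA s (pvSkipA s s[left] left) (dic.modify s[left] 0 (· + 1))
  else dic
termination_by s.length - left
decreasing_by
  have h1 : left + 1 ≤ pvSkipA s s[left] left := by
    conv_rhs => unfold pvSkipA
    simp only [h, dif_pos]
    exact pvSkipA_ge s s[left] (left + 1)
  omega

def solution (input_string : String) : String :=
  let s := input_string.toList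
  let dic := pvLoopA s 0 PySem.Dict.empty
  let answer := dic.keys.foldl
    (fun (a : PySem.Set Char) d => if (2 : Int) ≤ dic.getD d 0 then PySem.Set.add a d else a)
    PySem.Set.empty
  if answer = [] then "N"
  -- ''.join(sorted(answer)) over single characters is the string of the sorted char list
  else String.ofList (PySem.List.sorted answer (fun x => x) false)

-- ===== PORT B =====
-- hand port of str.rindex (last occurrence; exact whenever c ∈ l, and B only calls
-- it on characters of the string)
def pvRIdx : List Char → Char → Nat
  | [], _ => 0
  | _ :: xs, c => if c ∈ xs then pvRIdx xs c + 1 else 0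

def solution_alt (input_string : String) : String :=
  let s := input_string.toList
  -- s.index(c) is List.idxOf (first occurrence; exact since c ∈ s)
  let lonely := (PySem.List.sorted (PySem.Set.ofList s) (fun x => x) false).filter
    (fun c => decide (pvRIdx s c - s.idxOf c + 1 ≠ s.count c))
  if lonely = [] then "N" else String.ofList lonely

-- ===== PRECONDITION & SPEC =====
def Spec_solution (input_string : String) (out : String) : Prop := out = solution_alt input_string
instance (input_string : String) (out : String) : Decidable (Spec_solution input_string out) := by unfold Spec_solution; infer_instance

-- ===== CLAIM (what is proved, stated in full; the proofs are below) =====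
def Claim_equal_solution : Prop := ∀ (input_string : String), Dom_solution input_string → Spec_solution input_string (solution input_string)

-- ===== LEMMAS AND PROOFS =====

-- proof-only helper: the list of run heads (first char of each maximal run)
def pvGK : List Char → List Char
  | [] => []
  | [c] => [c]
  | a :: b :: t => if a = b then pvGK (b :: t) else a :: pvGK (b :: t)

-- skipping the run starting at r (whose char is c) drops exactly the first run head
theorem pvGK_drop (s : List Char) (c : Char) (r : Nat) (h : r < s.length) (hc : s[r] = c) :
    pvGK (s.drop r) = c :: pvGK (s.drop (pvSkipA s c r)) := by
  rw [List.drop_eq_getElem_cons h, hc]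
  conv_rhs => rw [pvSkipA, dif_pos h, if_pos hc]
  by_cases h1 : r + 1 < s.length
  · rw [List.drop_eq_getElem_cons h1]
    by_cases hb : s[r + 1] = c
    · rw [hb, pvGK, if_pos rfl]
      have ih := pvGK_drop s c (r + 1) h1 hb
      rw [List.drop_eq_getElem_cons h1, hb] at ih
      exact ih
    · rw [pvGK, if_neg (fun e => hb e.symm)]
      congr 1
      rw [← List.drop_eq_getElem_cons h1]
      conv_rhs => rw [pvSkipA, dif_pos h1, if_neg hb]
  · have hd : s.drop (r + 1) = [] := List.drop_eq_nil_of_le (by omega)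
    have hsk : pvSkipA s c (r + 1) = r + 1 := by rw [pvSkipA, dif_neg (by omega)]
    rw [hd, hsk, hd, pvGK, pvGK]

-- A's outer loop is a counting fold over the run heads of the remaining suffix
theorem pvLoopA_eq_fold (s : List Char) (left : Nat) (d : PySem.Dict Char Int) :
    pvLoopA s left d = (pvGK (s.drop left)).foldl (fun d x => d.modify x 0 (· + 1)) d := by
  rw [pvLoopA]
  by_cases h : left < s.length
  · simp only [dif_pos h]
    rw [pvLoopA_eq_fold s (pvSkipA s s[left] left), pvGK_drop s s[left] left h rfl,
      List.foldl_cons]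
  · simp only [dif_neg h]
    rw [List.drop_eq_nil_of_le (by omega), pvGK, List.foldl_nil]
termination_by s.length - left
decreasing_by
  have : left + 1 ≤ pvSkipA s s[left] left := by
    conv_rhs => rw [pvSkipA, dif_pos h, if_pos rfl]
    exact pvSkipA_ge s s[left] (left + 1)
  omega

-- run heads have the same characters as the list
theorem pvGK_mem (l : List Char) (c : Char) : c ∈ pvGK l ↔ c ∈ l := by
  match l with
  | [] => rfl
  | [a] => rfl
  | a :: b :: t =>
    have ih := pvGK_mem (b :: t) c
    rw [pvGK]
    by_cases hab : a = b
    · subst hab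
      simp [ih]
    · simp [hab, ih]

-- first maximal run of c (after dropping the prefix without c)
def pvFR (l : List Char) (c : Char) : List Char :=
  (l.dropWhile (fun x => x != c)).takeWhile (fun x => x == c)

-- exactly one run of c ↔ all occurrences of c are in the first run
theorem pvGK_count_one (l : List Char) (c : Char) (h : c ∈ l) :
    (pvGK l).count c = 1 ↔ l.count c = (pvFR l c).length := by
  match l with
  | [] => cases h
  | [a] =>
    have hca : c = a := by simpa using h
    subst hca
    simp [pvGK, pvFR]
  | a :: b :: t =>
    by_cases hca : c = a
    · subst hca
      by_cases hb : b = c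
      · subst hb
        have ih := pvGK_count_one (b :: t) b (List.mem_cons_self ..)
        have hfr2 : pvFR (b :: b :: t) b = b :: pvFR (b :: t) b := by
          simp [pvFR]
        rw [pvGK, if_pos rfl, hfr2, List.length_cons, List.count_cons_self]
        omega
      · rw [pvGK, if_neg (fun e => hb e.symm)]
        have hfr : pvFR (c :: b :: t) c = [c] := by
          simp [pvFR, hb]
        rw [hfr]
        have hmem := pvGK_mem (b :: t) c
        have hz : (pvGK (b :: t)).count c = 0 ↔ (b :: t).count c = 0 := by
          rw [List.count_eq_zero, List.count_eq_zero]
          exact not_congr hmem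
        simp only [List.count_cons_self, List.length_cons, List.length_nil]
        omega
    · -- c ≠ a: head contributes nothing; c ∈ b :: t
      have hcbt : c ∈ b :: t := by
        rcases List.mem_cons.mp h with h' | h'
        · exact absurd h' hca
        · exact h'
      have ih := pvGK_count_one (b :: t) c hcbt
      have hac : a ≠ c := fun e => hca e.symm
      have hfr : pvFR (a :: b :: t) c = pvFR (b :: t) c := by
        simp only [pvFR, List.dropWhile_cons]
        rw [if_pos (by simpa [bne_iff_ne] using hac)]
      have hcnt : (a :: b :: t).count c = (b :: t).count c := by
        simp [hac]
      rw [pvGK]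
      by_cases hab : a = b
      · rw [if_pos hab, hfr, hcnt]; exact ih
      · rw [if_neg hab, hfr, hcnt]
        have hsk : (a :: pvGK (b :: t)).count c = (pvGK (b :: t)).count c := by
          simp [hac]
        rw [hsk]; exact ih

-- last index bounds the count
theorem pvRIdx_count (m : List Char) (c : Char) (h : c ∈ m) :
    m.count c ≤ pvRIdx m c + 1 := by
  induction m with
  | nil => cases h
  | cons y ys ih =>
    by_cases hy : c ∈ ys
    · have := ih hy
      simp only [pvRIdx, if_pos hy, List.count_cons]
      split <;> omega
    · have hyc : y = c := by
        rcases List.mem_cons.mp h with h' | h'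
        · exact h'.symm
        · exact absurd h' hy
      subst hyc
      simp [pvRIdx, hy, List.count_eq_zero_of_not_mem hy]

-- span = count ↔ all occurrences of c are in the first run
theorem pvSpan_eq (l : List Char) (c : Char) (h : c ∈ l) :
    pvRIdx l c - l.idxOf c + 1 = l.count c ↔ l.count c = (pvFR l c).length := by
  induction l with
  | nil => cases h
  | cons x xs ih =>
    by_cases hx : x = c
    · subst hx
      have hidx : (x :: xs).idxOf x = 0 := by simp
      by_cases hxs : x ∈ xs
      · cases xs with
        | nil => cases hxs
        | cons b t =>
          by_cases hb : b = x
          · subst hb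
            have ihh := ih hxs
            have hidx2 : (b :: t).idxOf b = 0 := by simp
            rw [hidx2] at ihh
            simp only [pvRIdx, if_pos hxs, hidx, Nat.sub_zero, List.count_cons,
              beq_self_eq_true, if_true] at ihh ⊢
            have hfr : pvFR (b :: b :: t) b = b :: pvFR (b :: t) b := by
              simp [pvFR]
            rw [hfr, List.length_cons]
            omega
          · -- b ≠ x, x ∈ b :: t so x ∈ t: first run is [x]; count ≥ 2; span > count
            have hxt : x ∈ t := by
              rcases List.mem_cons.mp hxs with h' | h'
              · exact absurd h'.symm hb
              · exact h'
            have hfr : pvFR (x :: b :: t) x = [x] := by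
              simp [pvFR, hb]
            have hcnt : 1 ≤ (b :: t).count x := List.count_pos_iff.mpr hxs
            have hne : (b :: t).count x = t.count x :=
              List.count_cons_of_ne hb
            have hRc : (b :: t).count x ≤ pvRIdx t x + 1 := by
              rw [hne]; exact pvRIdx_count t x hxt
            rw [hfr, hidx, List.count_cons_self]
            simp only [pvRIdx, if_pos hxs, if_pos hxt, List.length_cons, List.length_nil,
              Nat.sub_zero]
            omega
      · -- x ∉ xs: single occurrence at head: both sides hold
        have hcnt0 : xs.count x = 0 := List.count_eq_zero_of_not_mem hxs
        have hfr : pvFR (x :: xs) x = [x] := by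
          cases xs with
          | nil => simp [pvFR]
          | cons b t =>
            have hb : b ≠ x := fun e => hxs (e ▸ List.mem_cons_self ..)
            simp [pvFR, hb]
        rw [hfr, hidx]
        simp [pvRIdx, hxs, hcnt0]
    · -- x ≠ c: everything shifts by one
      have hcxs : c ∈ xs := by
        rcases List.mem_cons.mp h with h' | h'
        · exact absurd h'.symm hx
        · exact h'
      have ihh := ih hcxs
      have hidx : (x :: xs).idxOf c = xs.idxOf c + 1 := by
        simp [List.idxOf_cons_ne, hx]
      have hfr : pvFR (x :: xs) c = pvFR xs c := by
        simp only [pvFR, List.dropWhile_cons]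
        rw [if_pos (by simp [bne_iff_ne]; exact hx)]
      have hcnt : (x :: xs).count c = xs.count c := by
        exact List.count_cons_of_ne hx
      rw [hidx, hfr, hcnt]
      simp only [pvRIdx, if_pos hcxs, Nat.succ_sub_succ]
      exact ihh

-- the two lonely-character tests agree
theorem pvLonely_iff (l : List Char) (c : Char) (h : c ∈ l) :
    2 ≤ (pvGK l).count c ↔ pvRIdx l c - l.idxOf c + 1 ≠ l.count c := by
  have h1 : 1 ≤ (pvGK l).count c := List.count_pos_iff.mpr ((pvGK_mem l c).mpr h)
  constructor
  · intro h2 hspan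
    have := (pvGK_count_one l c h).mpr ((pvSpan_eq l c h).mp hspan)
    omega
  · intro h2
    rcases Nat.lt_or_ge ((pvGK l).count c) 2 with hlt | hge
    · have hone : (pvGK l).count c = 1 := by omega
      exact absurd ((pvSpan_eq l c h).mpr ((pvGK_count_one l c h).mp hone)) h2
    · exact hge

-- ===== VERDICT (by name: the statement is the Claim_ definition above) =====
theorem solution_spec : Claim_equal_solution := by
  intro input_string _
  unfold Spec_solution solution solution_alt
  dsimp only
  set l := input_string.toList with hl
  set g := pvGK l with hg
  have hdic : pvLoopA l 0 PySem.Dict.empty = PySem.Dict.counter g := by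
    rw [pvLoopA_eq_fold, List.drop_zero, PySem.Dict.counter_eq_foldl]
  rw [hdic]
  set F := ((PySem.Set.ofList g).filter
      (fun k => decide ((2 : Int) ≤ (g.count k : Int)))) with hF
  have hFnd : F.Nodup := (PySem.Set.nodup_ofList g).filter _
  have hA : ((PySem.Dict.counter g).keys.foldl
      (fun (a : PySem.Set Char) d =>
        if (2 : Int) ≤ (PySem.Dict.counter g).getD d 0 then PySem.Set.add a d else a)
      PySem.Set.empty) = F := by
    rw [PySem.List.foldl_ite_eq_foldl_filter]
    show PySem.Set.ofList _ = F
    rw [PySem.Dict.keys_counter]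
    simp only [PySem.Dict.getD_counter]
    exact PySem.Set.ofList_eq_self_of_nodup _ hFnd
  rw [hA]
  -- B's filtered list is the sorted version of F
  set Fb := ((PySem.List.sorted (PySem.Set.ofList l) (fun x => x) false).filter
    (fun c => decide (pvRIdx l c - l.idxOf c + 1 ≠ l.count c))) with hFb
  have hsorted : PySem.List.sorted F (fun x => x) false = Fb := by
    apply PySem.List.sorted_eq_of_perm_of_pairwise_lt
    · apply (List.perm_ext_iff_of_nodup _ hFnd).mpr
      · intro c
        simp only [hFb, hF, List.mem_filter, PySem.List.mem_sorted, PySem.Set.mem_ofList,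
          decide_eq_true_eq]
        constructor
        · rintro ⟨hcl, hcspan⟩
          refine ⟨(pvGK_mem l c).mpr hcl, ?_⟩
          have hge := (pvLonely_iff l c hcl).mpr hcspan
          rw [← hg] at hge
          omega
        · rintro ⟨hcg, hcnt⟩
          rw [hg] at hcg hcnt
          have hcl := (pvGK_mem l c).mp hcg
          exact ⟨hcl, (pvLonely_iff l c hcl).mp (by omega)⟩
      · exact ((PySem.List.sorted_perm _ _ _).nodup_iff.mpr (PySem.Set.nodup_ofList l)).filter _
    · exact (PySem.List.sorted_ofList_pairwise_lt l).filter _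
  by_cases hFe : F = []
  · have : Fb = [] := by rw [← hsorted, hFe]; rfl
    simp [hFe, this]
  · have hFbne : Fb ≠ [] := by
      rw [← hsorted]
      simp [PySem.List.sorted_eq_nil_iff, hFe]
    rw [if_neg hFe, if_neg hFbne, hsorted]
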